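-- pv_equiv track=rewrite | github.com/ravish-oo/arc-agi-opoch-toe | arc_universe/arc_core/shape.py | meet_partitions
-- ===== SOURCE A (Python) =====
-- from typing import Dict, List, Tuple
--
-- Partition = Dict[int, int]
--
-- def meet_partitions(partitions: List[Partition]) -> Partition:
--     """
--     Compute the meet of multiple partitions.
--
--     The meet is the finest partition such that if two elements are in the same
--     class in the meet, they must be in the same class in ALL input partitions.
--
--     Args:
--         partitions: List of partitions (each is dict: element -> class_id)
--
--     Returns:
--         Partition: element -> meet_class_id
--
--     Note: All partitions must have the same elements (same keys).
--     """
--     if not partitions: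
--         return {}
--
--     if len(partitions) == 1:
--         # Re-normalize to start from 0
--         p = partitions[0]
--         unique_classes = sorted(set(p.values()))
--         class_map = {old: new for new, old in enumerate(unique_classes)}
--         return {k: class_map[v] for k, v in p.items()}
--
--     # Get all elements (should be same across all partitions)
--     elements = sorted(partitions[0].keys())
--
--     # For each element, create a signature: tuple of its class in each partition
--     signatures: Dict[int, Tuple] = {}
--     for elem in elements:
--         sig = tuple(p[elem] for p in partitions)
--         signatures[elem] = sig
--
--     # Assign meet class IDs based on unique signatures
--     sig2id: Dict[Tuple, int] = {}
--     next_id = 0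
--     meet: Dict[int, int] = {}
--
--     for elem in elements:
--         sig = signatures[elem]
--         if sig not in sig2id:
--             sig2id[sig] = next_id
--             next_id += 1
--         meet[elem] = sig2id[sig]
--
--     return meet
-- ===== SOURCE B (Python) =====
-- def meet_partitions(partitions):
--     if not partitions:
--         return {}
--     if len(partitions) == 1:
--         p = partitions[0]
--         u = sorted(set(p.values()))
--         return {k: u.index(v) for k, v in p.items()}
--     # Pairwise reduction: fold the partitions two at a time.  Combining the
--     # accumulated labeling with the next partition by first-seen numbering over
--     # the sorted elements yields the same ids as numbering full signature
--     # tuples, because the accumulated id is injective on prefix signatures and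
--     # preserves first-seen order.
--     elements = sorted(partitions[0])
--     acc = partitions[0]
--     for p in partitions[1:]:
--         ids = {}
--         new = {}
--         for e in elements:
--             key = (acc[e], p[e])
--             if key not in ids:
--                 ids[key] = len(ids)
--             new[e] = ids[key]
--         acc = new
--     return acc
-- ===== Notes on version B (the rewrite author's own statement) =====
-- stated objective: alternative
-- what changed: Replaces A's one-shot scheme (build a full cross-partition signature tuple per element, then number unique tuples first-seen) with a pairwise left fold: the running labeling is combined with one partition at a time, renumbering (current_id, next_class) pairs first-seen over the sorted elements; no signature tuples or element-keyed signature dict exist in B.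
import Mathlib
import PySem

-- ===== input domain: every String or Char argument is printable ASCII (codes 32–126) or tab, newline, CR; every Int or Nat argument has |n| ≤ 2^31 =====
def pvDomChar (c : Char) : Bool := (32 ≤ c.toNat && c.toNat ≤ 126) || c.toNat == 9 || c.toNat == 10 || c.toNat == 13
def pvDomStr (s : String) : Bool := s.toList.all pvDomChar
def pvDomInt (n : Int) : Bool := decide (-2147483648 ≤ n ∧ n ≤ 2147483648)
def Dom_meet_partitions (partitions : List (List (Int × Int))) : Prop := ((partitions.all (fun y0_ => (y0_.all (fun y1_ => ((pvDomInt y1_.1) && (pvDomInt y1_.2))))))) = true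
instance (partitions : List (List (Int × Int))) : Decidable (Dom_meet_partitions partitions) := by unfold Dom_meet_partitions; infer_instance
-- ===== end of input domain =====

-- B replaces A's one-shot full-signature-tuple numbering by a pairwise left fold that combines
-- the running labeling with one partition at a time (alternative decomposition, same cost).


-- ===== PORT A =====
-- p[elem] is ported as getD elem 0; the KeyError inputs are excluded by Pre_meet_partitions.
def meet_partitions (partitions : List (List (Int × Int))) : List (Int × Int) :=
  match partitions with
  | [] => []
  | p0 :: rest =>
    if rest = [] then
      -- single-partition branch: re-normalize classes to start from 0
      let p := PySem.Dict.ofList p0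
      let uniqueClasses := PySem.List.sorted (PySem.Set.ofList p.values) (fun x => x) false
      let classMap : PySem.Dict Int Int :=
        (PySem.List.enumerate uniqueClasses).foldl (fun d nv => d.insert nv.2 nv.1) PySem.Dict.empty
      (p.items.foldl (fun (m : PySem.Dict Int Int) kv => m.insert kv.1 (classMap.getD kv.2 0))
        PySem.Dict.empty).items
    else
      let elements := PySem.List.sorted (PySem.Dict.ofList p0).keys (fun x => x) false
      -- signatures: elem -> tuple of its class in each partition
      let signatures : PySem.Dict Int (List Int) :=
        elements.foldl
          (fun d e => d.insert e ((p0 :: rest).map (fun q => (PySem.Dict.ofList q).getD e 0)))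
          PySem.Dict.empty
      -- sig2id / next_id / meet loop
      let st := elements.foldl
        (fun (st : PySem.Dict (List Int) Int × Int × PySem.Dict Int Int) e =>
          let sig := signatures.getD e []
          let s2i := if st.1.contains sig then st.1 else st.1.insert sig st.2.1
          let nid := if st.1.contains sig then st.2.1 else st.2.1 + 1
          (s2i, nid, st.2.2.insert e (s2i.getD sig 0)))
        (PySem.Dict.empty, 0, PySem.Dict.empty)
      st.2.2.items

-- ===== PORT B =====
-- pairwise reduction: fold the later partitions into a running labeling, renumbering
-- (current_id, next_class) pairs first-seen over the sorted elements at each step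
def meet_partitions_alt (partitions : List (List (Int × Int))) : List (Int × Int) :=
  match partitions with
  | [] => []
  | p0 :: rest =>
    if rest = [] then
      let p := PySem.Dict.ofList p0
      let u := PySem.List.sorted (PySem.Set.ofList p.values) (fun x => x) false
      (p.items.foldl
        (fun (m : PySem.Dict Int Int) kv =>
          m.insert kv.1 (((PySem.List.index? u kv.2).getD 0 : Nat) : Int))
        PySem.Dict.empty).items
    else
      let elements := PySem.List.sorted (PySem.Dict.ofList p0).keys (fun x => x) false
      let acc := rest.foldl
        (fun (acc : PySem.Dict Int Int) p =>
          let pd := PySem.Dict.ofList p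
          (elements.foldl
            (fun (st : PySem.Dict (Int × Int) Int × PySem.Dict Int Int) e =>
              let key := (acc.getD e 0, pd.getD e 0)
              let ids := if st.1.contains key then st.1
                         else st.1.insert key (st.1.items.length : Int)
              (ids, st.2.insert e (ids.getD key 0)))
            (PySem.Dict.empty, PySem.Dict.empty)).2)
        (PySem.Dict.ofList p0)
      acc.items

-- ===== PRECONDITION & SPEC =====
-- Pre_ excludes exactly the inputs where A raises KeyError: two or more partitions and some
-- key of partitions[0] missing from some partition.
def Pre_meet_partitions (partitions : List (List (Int × Int))) : Prop :=
  partitions.length ≤ 1 ∨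
    ((PySem.Dict.ofList partitions.headI).keys.all
      (fun e => partitions.all (fun q => (PySem.Dict.ofList q).contains e))) = true
instance (partitions : List (List (Int × Int))) : Decidable (Pre_meet_partitions partitions) := by
  unfold Pre_meet_partitions; infer_instance

def pvWitness_meet_partitions : (List (List (Int × Int))) :=
  [[(0, 1), (1, 1), (2, 5)], [(0, 2), (1, 3), (2, 3)]]

def Spec_meet_partitions (partitions : List (List (Int × Int))) (out : List (Int × Int)) : Prop := out = meet_partitions_alt partitions
instance (partitions : List (List (Int × Int))) (out : List (Int × Int)) : Decidable (Spec_meet_partitions partitions out) := by unfold Spec_meet_partitions; infer_instance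

-- ===== CLAIM (what is proved, stated in full; the proofs are below) =====
def Claim_equal_meet_partitions : Prop := ∀ (partitions : List (List (Int × Int))), Dom_meet_partitions partitions → Pre_meet_partitions partitions → Spec_meet_partitions partitions (meet_partitions partitions)

-- ===== LEMMAS AND PROOFS =====

def pvIdDict {α : Type} [BEq α] [LawfulBEq α] (l : List α) : PySem.Dict α Int :=
  (PySem.List.enumerate l).foldl (fun d is => d.insert is.2 is.1) PySem.Dict.empty

theorem pvGet?_enumFold_of_not_mem {α : Type} [BEq α] [LawfulBEq α]
    (l : List α) (st : Int) (d : PySem.Dict α Int) (s : α) (hs : s ∉ l) :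
    ((PySem.List.enumerate l st).foldl (fun d is => d.insert is.2 is.1) d).get? s = d.get? s := by
  induction l generalizing st d with
  | nil => simp [PySem.List.enumerate_nil]
  | cons x xs ih =>
    simp only [PySem.List.enumerate_cons, List.foldl_cons]
    rw [ih _ _ (by simp at hs; exact hs.2)]
    exact PySem.Dict.get?_insert_of_ne (hne := by simp at hs; exact hs.1) ..

theorem pvGet?_enumFold {α : Type} [BEq α] [LawfulBEq α]
    (l : List α) (st : Int) (d : PySem.Dict α Int) (hl : l.Nodup) (s : α) (hs : s ∈ l) :
    ((PySem.List.enumerate l st).foldl (fun d is => d.insert is.2 is.1) d).get? s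
      = some (st + (l.idxOf s : Int)) := by
  induction l generalizing st d with
  | nil => simp at hs
  | cons x xs ih =>
    simp only [PySem.List.enumerate_cons, List.foldl_cons]
    rcases List.mem_cons.mp hs with h | h
    · subst h
      rw [pvGet?_enumFold_of_not_mem _ _ _ _ (by simp at hl; exact hl.1)]
      simp [PySem.Dict.get?_insert_self, List.idxOf_cons_self]
    · have hne : s ≠ x := fun he => by simp at hl; exact hl.1 (he ▸ h)
      rw [ih _ _ (by simp at hl; exact hl.2) h]
      have : (x :: xs).idxOf s = xs.idxOf s + 1 := by simp [Ne.symm hne]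
      rw [this]; push_cast; ring_nf

theorem pvGetD_idDict {α : Type} [BEq α] [LawfulBEq α]
    (l : List α) (hl : l.Nodup) (s : α) (hs : s ∈ l) :
    (pvIdDict l).getD s 0 = (l.idxOf s : Int) := by
  have h := pvGet?_enumFold l 0 PySem.Dict.empty hl s hs
  unfold pvIdDict
  rw [PySem.Dict.getD_eq_get?_getD, h]; simp

theorem pvContains_idDict {α : Type} [BEq α] [LawfulBEq α] [DecidableEq α] (l : List α) (s : α) :
    (pvIdDict l).contains s = decide (s ∈ l) := by
  have hk : (pvIdDict l).keys = PySem.Set.ofList l := by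
    unfold pvIdDict
    rw [PySem.Dict.keys_foldl_insert_key]
    simp [PySem.List.map_snd_enumerate, PySem.Set.update_nil_left, PySem.Dict.keys_empty]
  rw [PySem.Dict.contains_eq_decide_mem_keys, hk]
  simp [PySem.Set.mem_ofList]

theorem pvIdDict_append_singleton {α : Type} [BEq α] [LawfulBEq α] (l : List α) (s : α) :
    pvIdDict (l ++ [s]) = (pvIdDict l).insert s (l.length : Int) := by
  unfold pvIdDict
  rw [PySem.List.enumerate_append, List.foldl_append]
  simp [PySem.List.enumerate_cons, PySem.List.enumerate_nil]

theorem pvIdDict_items_length {α : Type} [BEq α] [LawfulBEq α] (l : List α) (hl : l.Nodup) :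
    (pvIdDict l).items.length = l.length := by
  have h := PySem.Dict.items_foldl_insert_fresh (l := PySem.List.enumerate l 0)
    (k := fun is => is.2) (v := fun is => is.1) (d := PySem.Dict.empty)
    (fun a _ => PySem.Dict.contains_empty a.2)
    (by simpa [PySem.List.map_snd_enumerate] using hl)
  unfold pvIdDict
  rw [h]
  have hei : PySem.Dict.empty.items = ([] : List (α × Int)) := rfl
  simp [hei, PySem.List.length_enumerate]

theorem pvIdxOf_append_notMem {α : Type} [BEq α] [LawfulBEq α]
    (l1 l2 : List α) (v : α) (h : v ∉ l1) :
    (l1 ++ l2).idxOf v = l1.length + l2.idxOf v := by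
  simp [List.idxOf_append, h, Nat.add_comm]

theorem pvIdxOf_inj {α : Type} [BEq α] [LawfulBEq α] (l : List α) (x y : α)
    (hx : x ∈ l) (he : l.idxOf x = l.idxOf y) : x = y := by
  have h1 : l.idxOf x < l.length := List.idxOf_lt_length_of_mem hx
  have h2 := List.getElem_idxOf h1
  have h3 := List.getElem_idxOf (show l.idxOf y < l.length from he ▸ h1)
  rw [← h2]
  conv_rhs => rw [← h3]
  simp [he]

-- ---------- A-side loop ----------

def pvStep (f : Int → List Int) (st : PySem.Dict (List Int) Int × Int × PySem.Dict Int Int)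
    (e : Int) : PySem.Dict (List Int) Int × Int × PySem.Dict Int Int :=
  let sig := f e
  let s2i := if st.1.contains sig then st.1 else st.1.insert sig st.2.1
  let nid := if st.1.contains sig then st.2.1 else st.2.1 + 1
  (s2i, nid, st.2.2.insert e (s2i.getD sig 0))

theorem pvLoopA (f : Int → List Int) :
    ∀ (suf pre : List Int) (m : PySem.Dict Int Int),
      suf.Nodup → (∀ e ∈ suf, m.contains e = false) →
      (suf.foldl (pvStep f)
        (pvIdDict (PySem.List.dedup (pre.map f)),
         ((PySem.List.dedup (pre.map f)).length : Int), m)).2.2.items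
      = m.items
        ++ suf.map (fun e => (e, ((PySem.List.dedup ((pre ++ suf).map f)).idxOf (f e) : Int)))
  | [], pre, m, _, _ => by simp
  | e :: t, pre, m, hnd, hfresh => by
    have hndt : t.Nodup := (List.nodup_cons.mp hnd).2
    have het : e ∉ t := (List.nodup_cons.mp hnd).1
    have hme : m.contains e = false := hfresh e (List.mem_cons_self ..)
    have hassoc : pre ++ [e] ++ t = pre ++ e :: t := by simp
    set D := PySem.List.dedup (pre.map f) with hDdef
    have hDnd : D.Nodup := PySem.List.nodup_dedup _
    have hfresh' : ∀ v, ∀ e' ∈ t, (m.insert e v).contains e' = false := by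
      intro v e' he'
      rw [PySem.Dict.contains_insert]
      have h1 : e' ≠ e := fun h => het (h ▸ he')
      simp [hfresh e' (List.mem_cons_of_mem _ he'), h1]
    by_cases hmem : f e ∈ pre.map f
    · have hD : f e ∈ D := by rw [hDdef]; exact (PySem.List.mem_dedup _ _).mpr hmem
      have hpre' : PySem.List.dedup ((pre ++ [e]).map f) = D := by
        rw [List.map_append, List.map_singleton]
        simp only [PySem.List.dedup_eq_ofList] at hDdef ⊢
        rw [PySem.Set.ofList_append_singleton, ← hDdef, PySem.Set.add_of_mem hD]
      have hfull : ∃ w, PySem.List.dedup ((pre ++ e :: t).map f) = D ++ w := by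
        rw [List.map_append]
        simp only [PySem.List.dedup_eq_ofList] at hDdef ⊢
        rw [PySem.Set.ofList_append, PySem.Set.update_eq_append_filter, ← hDdef]
        exact ⟨_, rfl⟩
      obtain ⟨w, hw⟩ := hfull
      have hstep : pvStep f (pvIdDict D, (D.length : Int), m) e
          = (pvIdDict D, (D.length : Int), m.insert e ((pvIdDict D).getD (f e) 0)) := by
        simp [pvStep, pvContains_idDict, hD]
      rw [List.foldl_cons, hstep, ← hpre']
      rw [pvLoopA f t (pre ++ [e]) _ hndt (hfresh' _)]
      rw [PySem.Dict.items_insert_of_not_contains (h := hme)]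
      rw [hpre', pvGetD_idDict D hDnd _ hD, hassoc]
      rw [List.map_cons, List.append_assoc, List.singleton_append]
      rw [hw, List.idxOf_append_of_mem hD]
    · have hD : f e ∉ D := by rw [hDdef]; exact fun h => hmem ((PySem.List.mem_dedup _ _).mp h)
      have hpre' : PySem.List.dedup ((pre ++ [e]).map f) = D ++ [f e] := by
        rw [List.map_append, List.map_singleton]
        simp only [PySem.List.dedup_eq_ofList] at hDdef ⊢
        rw [PySem.Set.ofList_append_singleton, ← hDdef, PySem.Set.add_of_not_mem hD]
      have hnd' : (D ++ [f e]).Nodup := by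
        simp [List.nodup_append, hDnd]
        intro a ha
        exact fun h => hD (h ▸ ha)
      have hDe : f e ∈ D ++ [f e] := List.mem_append_right _ (List.mem_singleton.mpr rfl)
      have hfull : ∃ w, PySem.List.dedup ((pre ++ e :: t).map f) = (D ++ [f e]) ++ w := by
        rw [← hassoc, List.map_append]
        simp only [PySem.List.dedup_eq_ofList] at hpre' ⊢
        rw [PySem.Set.ofList_append, PySem.Set.update_eq_append_filter, hpre']
        exact ⟨_, rfl⟩
      obtain ⟨w, hw⟩ := hfull
      have hstep : pvStep f (pvIdDict D, (D.length : Int), m) e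
          = (pvIdDict (D ++ [f e]), ((D ++ [f e]).length : Int),
             m.insert e ((pvIdDict (D ++ [f e])).getD (f e) 0)) := by
        simp [pvStep, pvContains_idDict, hD, pvIdDict_append_singleton]
      rw [List.foldl_cons, hstep, ← hpre']
      rw [pvLoopA f t (pre ++ [e]) _ hndt (hfresh' _)]
      rw [PySem.Dict.items_insert_of_not_contains (h := hme)]
      rw [hpre', pvGetD_idDict (D ++ [f e]) hnd' _ hDe, hassoc]
      rw [List.map_cons, List.append_assoc, List.singleton_append]
      rw [hw, List.idxOf_append_of_mem hDe]

-- ---------- B-side loop ----------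

def pvStepB {κ : Type} [BEq κ] [LawfulBEq κ] (f : Int → κ)
    (st : PySem.Dict κ Int × PySem.Dict Int Int) (e : Int) :
    PySem.Dict κ Int × PySem.Dict Int Int :=
  let key := f e
  let ids := if st.1.contains key then st.1 else st.1.insert key (st.1.items.length : Int)
  (ids, st.2.insert e (ids.getD key 0))

theorem pvLoopB {κ : Type} [BEq κ] [LawfulBEq κ] [DecidableEq κ] (f : Int → κ) :
    ∀ (suf pre : List Int) (m : PySem.Dict Int Int),
      suf.Nodup → (∀ e ∈ suf, m.contains e = false) →
      (suf.foldl (pvStepB f) (pvIdDict (PySem.List.dedup (pre.map f)), m)).2.items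
      = m.items
        ++ suf.map (fun e => (e, ((PySem.List.dedup ((pre ++ suf).map f)).idxOf (f e) : Int)))
  | [], pre, m, _, _ => by simp
  | e :: t, pre, m, hnd, hfresh => by
    have hndt : t.Nodup := (List.nodup_cons.mp hnd).2
    have het : e ∉ t := (List.nodup_cons.mp hnd).1
    have hme : m.contains e = false := hfresh e (List.mem_cons_self ..)
    have hassoc : pre ++ [e] ++ t = pre ++ e :: t := by simp
    set D := PySem.List.dedup (pre.map f) with hDdef
    have hDnd : D.Nodup := PySem.List.nodup_dedup _
    have hfresh' : ∀ v, ∀ e' ∈ t, (m.insert e v).contains e' = false := by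
      intro v e' he'
      rw [PySem.Dict.contains_insert]
      have h1 : e' ≠ e := fun h => het (h ▸ he')
      simp [hfresh e' (List.mem_cons_of_mem _ he'), h1]
    by_cases hmem : f e ∈ pre.map f
    · have hD : f e ∈ D := by rw [hDdef]; exact (PySem.List.mem_dedup _ _).mpr hmem
      have hpre' : PySem.List.dedup ((pre ++ [e]).map f) = D := by
        rw [List.map_append, List.map_singleton]
        simp only [PySem.List.dedup_eq_ofList] at hDdef ⊢
        rw [PySem.Set.ofList_append_singleton, ← hDdef, PySem.Set.add_of_mem hD]
      have hfull : ∃ w, PySem.List.dedup ((pre ++ e :: t).map f) = D ++ w := by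
        rw [List.map_append]
        simp only [PySem.List.dedup_eq_ofList] at hDdef ⊢
        rw [PySem.Set.ofList_append, PySem.Set.update_eq_append_filter, ← hDdef]
        exact ⟨_, rfl⟩
      obtain ⟨w, hw⟩ := hfull
      have hstep : pvStepB f (pvIdDict D, m) e
          = (pvIdDict D, m.insert e ((pvIdDict D).getD (f e) 0)) := by
        simp [pvStepB, pvContains_idDict, hD]
      rw [List.foldl_cons, hstep, ← hpre']
      rw [pvLoopB f t (pre ++ [e]) _ hndt (hfresh' _)]
      rw [PySem.Dict.items_insert_of_not_contains (h := hme)]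
      rw [hpre', pvGetD_idDict D hDnd _ hD, hassoc]
      rw [List.map_cons, List.append_assoc, List.singleton_append]
      rw [hw, List.idxOf_append_of_mem hD]
    · have hD : f e ∉ D := by rw [hDdef]; exact fun h => hmem ((PySem.List.mem_dedup _ _).mp h)
      have hpre' : PySem.List.dedup ((pre ++ [e]).map f) = D ++ [f e] := by
        rw [List.map_append, List.map_singleton]
        simp only [PySem.List.dedup_eq_ofList] at hDdef ⊢
        rw [PySem.Set.ofList_append_singleton, ← hDdef, PySem.Set.add_of_not_mem hD]
      have hnd' : (D ++ [f e]).Nodup := by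
        simp [List.nodup_append, hDnd]
        intro a ha
        exact fun h => hD (h ▸ ha)
      have hDe : f e ∈ D ++ [f e] := List.mem_append_right _ (List.mem_singleton.mpr rfl)
      have hfull : ∃ w, PySem.List.dedup ((pre ++ e :: t).map f) = (D ++ [f e]) ++ w := by
        rw [← hassoc, List.map_append]
        simp only [PySem.List.dedup_eq_ofList] at hpre' ⊢
        rw [PySem.Set.ofList_append, PySem.Set.update_eq_append_filter, hpre']
        exact ⟨_, rfl⟩
      obtain ⟨w, hw⟩ := hfull
      have hstep : pvStepB f (pvIdDict D, m) e
          = (pvIdDict (D ++ [f e]),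
             m.insert e ((pvIdDict (D ++ [f e])).getD (f e) 0)) := by
        simp [pvStepB, pvContains_idDict, hD, pvIdDict_append_singleton,
          pvIdDict_items_length D hDnd]
      rw [List.foldl_cons, hstep, ← hpre']
      rw [pvLoopB f t (pre ++ [e]) _ hndt (hfresh' _)]
      rw [PySem.Dict.items_insert_of_not_contains (h := hme)]
      rw [hpre', pvGetD_idDict (D ++ [f e]) hnd' _ hDe, hassoc]
      rw [List.map_cons, List.append_assoc, List.singleton_append]
      rw [hw, List.idxOf_append_of_mem hDe]

-- first-seen indices are preserved by any key change that respects the same equality classes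
theorem pvIdxTransfer {κ₁ κ₂ : Type} [BEq κ₁] [LawfulBEq κ₁] [BEq κ₂] [LawfulBEq κ₂]
    (k : Int → κ₁) (g : Int → κ₂) (l : List Int)
    (hkg : ∀ a ∈ l, ∀ b ∈ l, (k a = k b ↔ g a = g b)) :
    (PySem.List.dedup (l.map k)).length = (PySem.List.dedup (l.map g)).length ∧
    ∀ e ∈ l, (PySem.List.dedup (l.map k)).idxOf (k e) = (PySem.List.dedup (l.map g)).idxOf (g e) := by
  induction l using List.reverseRecOn with
  | nil => simp
  | append_singleton l x ih =>
    have hl : ∀ a ∈ l, ∀ b ∈ l, (k a = k b ↔ g a = g b) := fun a ha b hb =>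
      hkg a (List.mem_append_left _ ha) b (List.mem_append_left _ hb)
    obtain ⟨hlen, hidx⟩ := ih hl
    have hmem : k x ∈ l.map k ↔ g x ∈ l.map g := by
      simp only [List.mem_map]
      constructor
      · rintro ⟨a, ha, hax⟩
        exact ⟨a, ha, (hkg a (List.mem_append_left _ ha) x (List.mem_append_right _ (by simp))).mp hax⟩
      · rintro ⟨a, ha, hax⟩
        exact ⟨a, ha, (hkg a (List.mem_append_left _ ha) x (List.mem_append_right _ (by simp))).mpr hax⟩
    by_cases hx : k x ∈ l.map k
    · have hgx : g x ∈ l.map g := hmem.mp hx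
      have hDk : k x ∈ PySem.List.dedup (l.map k) := (PySem.List.mem_dedup _ _).mpr hx
      have hDg : g x ∈ PySem.List.dedup (l.map g) := (PySem.List.mem_dedup _ _).mpr hgx
      have hdk : PySem.List.dedup ((l ++ [x]).map k) = PySem.List.dedup (l.map k) := by
        rw [List.map_append, List.map_singleton]
        simp only [PySem.List.dedup_eq_ofList] at hDk ⊢
        rw [PySem.Set.ofList_append_singleton, PySem.Set.add_of_mem hDk]
      have hdg : PySem.List.dedup ((l ++ [x]).map g) = PySem.List.dedup (l.map g) := by
        rw [List.map_append, List.map_singleton]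
        simp only [PySem.List.dedup_eq_ofList] at hDg ⊢
        rw [PySem.Set.ofList_append_singleton, PySem.Set.add_of_mem hDg]
      refine ⟨by rw [hdk, hdg]; exact hlen, ?_⟩
      intro e he
      rw [hdk, hdg]
      rcases List.mem_append.mp he with he | he
      · exact hidx e he
      · have hex : e = x := by simpa using he
        subst hex
        obtain ⟨a, ha, hak⟩ := List.mem_map.mp hx
        have hga : g a = g e :=
          (hkg a (List.mem_append_left _ ha) e (List.mem_append_right _ (by simp))).mp hak
        rw [← hak, ← hga]
        exact hidx a ha
    · have hgx : g x ∉ l.map g := fun h => hx (hmem.mpr h)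
      have hDk : k x ∉ PySem.List.dedup (l.map k) := fun h => hx ((PySem.List.mem_dedup _ _).mp h)
      have hDg : g x ∉ PySem.List.dedup (l.map g) := fun h => hgx ((PySem.List.mem_dedup _ _).mp h)
      have hdk : PySem.List.dedup ((l ++ [x]).map k)
          = PySem.List.dedup (l.map k) ++ [k x] := by
        rw [List.map_append, List.map_singleton]
        simp only [PySem.List.dedup_eq_ofList] at hDk ⊢
        rw [PySem.Set.ofList_append_singleton, PySem.Set.add_of_not_mem hDk]
      have hdg : PySem.List.dedup ((l ++ [x]).map g)
          = PySem.List.dedup (l.map g) ++ [g x] := by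
        rw [List.map_append, List.map_singleton]
        simp only [PySem.List.dedup_eq_ofList] at hDg ⊢
        rw [PySem.Set.ofList_append_singleton, PySem.Set.add_of_not_mem hDg]
      refine ⟨by rw [hdk, hdg]; simp only [List.length_append, List.length_singleton]; rw [hlen], ?_⟩
      intro e he
      rcases List.mem_append.mp he with he | he
      · have hke : k e ∈ PySem.List.dedup (l.map k) :=
          (PySem.List.mem_dedup _ _).mpr (List.mem_map.mpr ⟨e, he, rfl⟩)
        have hge : g e ∈ PySem.List.dedup (l.map g) :=
          (PySem.List.mem_dedup _ _).mpr (List.mem_map.mpr ⟨e, he, rfl⟩)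
        rw [hdk, hdg, List.idxOf_append_of_mem hke, List.idxOf_append_of_mem hge]
        exact hidx e he
      · have hex : e = x := by simpa using he
        subst hex
        rw [hdk, hdg, pvIdxOf_append_notMem _ _ _ hDk, pvIdxOf_append_notMem _ _ _ hDg]
        simp only [List.idxOf_cons_self]
        omega

theorem pvIndex?_getD_of_mem (u : List Int) (v : Int) (h : v ∈ u) :
    (PySem.List.index? u v).getD 0 = u.idxOf v := by
  induction u with
  | nil => simp at h
  | cons x xs ih =>
    by_cases hx : x = v
    · subst hx; rw [PySem.List.index?_cons_self]; simp [List.idxOf_cons_self]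
    · have hv : v ∈ xs := by rcases List.mem_cons.mp h with h | h; exact absurd h.symm hx; exact h
      rw [PySem.List.index?_cons_of_ne _ hx, List.idxOf_cons_ne _ hx]
      rw [PySem.List.index?_eq_idxOf?] at ih
      obtain ⟨k, hk⟩ := Option.isSome_iff_exists.mp (List.isSome_idxOf?.mpr hv)
      simp [hk, ← ih hv]

theorem pvGetD_enumFold {α : Type} [BEq α] [LawfulBEq α]
    (l : List α) (hl : l.Nodup) (s : α) (hs : s ∈ l) :
    ((PySem.List.enumerate l 0).foldl (fun d is => d.insert is.2 is.1) PySem.Dict.empty).getD s 0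
      = (l.idxOf s : Int) := by
  have h := pvGet?_enumFold l 0 PySem.Dict.empty hl s hs
  rw [PySem.Dict.getD_eq_get?_getD, h]; simp

-- a fold of fresh inserts keyed by the element itself: lookup returns the inserted value
theorem pvGetD_insFold (elements : List Int) (hnd : elements.Nodup) (g : Int → List Int)
    (e : Int) (he : e ∈ elements) :
    (elements.foldl (fun d e => d.insert e (g e)) PySem.Dict.empty).getD e [] = g e := by
  have hitems := PySem.Dict.items_foldl_insert_fresh (l := elements) (k := fun a => a) (v := g)
    (d := PySem.Dict.empty) (by intro a _; exact PySem.Dict.contains_empty a)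
    (by simpa using hnd)
  have hknd : (elements.foldl (fun d e => d.insert e (g e)) PySem.Dict.empty).keys.Nodup :=
    PySem.Dict.nodup_keys_foldl_insert _ _ _ PySem.Dict.nodup_keys_empty
  refine PySem.Dict.getD_of_mem_items _ ?_ hknd _
  rw [hitems]
  exact List.mem_append_right _ (List.mem_map.mpr ⟨e, he, rfl⟩)

-- getD from an items characterization keyed by the elements themselves
theorem pvGetD_of_items (d : PySem.Dict Int Int) (elements : List Int) (v : Int → Int)
    (hitems : d.items = elements.map (fun e => (e, v e))) (hnd : elements.Nodup)
    (e : Int) (he : e ∈ elements) : d.getD e 0 = v e := by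
  have hk : d.keys = elements := by
    have h0 : d.keys = d.items.map (fun kv => kv.1) := rfl
    rw [h0, hitems, List.map_map]
    exact List.map_id _
  refine PySem.Dict.getD_of_mem_items _ ?_ (by rw [hk]; exact hnd) _
  rw [hitems]
  exact List.mem_map.mpr ⟨e, he, rfl⟩

theorem pvElems_nodup (p0 : List (Int × Int)) :
    (PySem.List.sorted (PySem.Dict.ofList p0).keys (fun x => x) false).Nodup :=
  (PySem.List.sorted_perm _ _ _).nodup_iff.mpr (PySem.Dict.nodup_keys_ofList _)

-- the full cross-partition signature of an element
def pvSig (ps : List (List (Int × Int))) (e : Int) : List Int :=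
  ps.map (fun q => (PySem.Dict.ofList q).getD e 0)

theorem pvA_general (p0 : List (Int × Int)) (rest : List (List (Int × Int))) (hr : rest ≠ []) :
    meet_partitions (p0 :: rest) =
      (PySem.List.sorted (PySem.Dict.ofList p0).keys (fun x => x) false).map
        (fun e => (e,
          ((PySem.List.dedup
              ((PySem.List.sorted (PySem.Dict.ofList p0).keys (fun x => x) false).map
                (pvSig (p0 :: rest)))).idxOf (pvSig (p0 :: rest) e) : Int))) := by
  have hnd := pvElems_nodup p0
  simp only [meet_partitions, if_neg hr]
  set elements := PySem.List.sorted (PySem.Dict.ofList p0).keys (fun x => x) false with helems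
  set g : Int → List Int := fun e => (p0 :: rest).map (fun q => (PySem.Dict.ofList q).getD e 0) with hg
  set sg := elements.foldl (fun d e => d.insert e (g e)) PySem.Dict.empty with hsg
  set f : Int → List Int := fun e => sg.getD e [] with hf
  have hfg : ∀ e ∈ elements, f e = g e := fun e he => pvGetD_insFold elements hnd g e he
  have hmapfg : elements.map f = elements.map g := List.map_congr_left hfg
  have hbridge :
      (elements.foldl
        (fun (st : PySem.Dict (List Int) Int × Int × PySem.Dict Int Int) e =>
          let sig := sg.getD e []
          let s2i := if st.1.contains sig then st.1 else st.1.insert sig st.2.1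
          let nid := if st.1.contains sig then st.2.1 else st.2.1 + 1
          (s2i, nid, st.2.2.insert e (s2i.getD sig 0)))
        (PySem.Dict.empty, 0, PySem.Dict.empty))
      = elements.foldl (pvStep f)
          (pvIdDict (PySem.List.dedup (([] : List Int).map f)),
           ((PySem.List.dedup (([] : List Int).map f)).length : Int), PySem.Dict.empty) := rfl
  rw [hbridge, pvLoopA f elements [] PySem.Dict.empty hnd
    (fun e _ => PySem.Dict.contains_empty e)]
  have hei : PySem.Dict.empty.items = ([] : List (Int × Int)) := rfl
  simp only [List.nil_append, hei]
  refine List.map_congr_left (fun e he => ?_)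
  have hsig : pvSig (p0 :: rest) e = g e := rfl
  have hmapsig : elements.map (pvSig (p0 :: rest)) = elements.map g := rfl
  rw [hfg e he, hmapfg, hsig, hmapsig]

theorem pvSingle (p0 : List (Int × Int)) :
    meet_partitions [p0] = meet_partitions_alt [p0] := by
  simp only [meet_partitions, meet_partitions_alt, reduceIte]
  set p := PySem.Dict.ofList p0 with hp
  set u := PySem.List.sorted (PySem.Set.ofList p.values) (fun x => x) false with hu
  set cm := (PySem.List.enumerate u).foldl (fun d nv => d.insert nv.2 nv.1) PySem.Dict.empty
    with hcm
  have hknd : (p.items.map (fun kv => kv.1)).Nodup := by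
    have h : p.items.map (fun kv => kv.1) = p.keys := rfl
    rw [h, hp]; exact PySem.Dict.nodup_keys_ofList _
  have hA := PySem.Dict.items_foldl_insert_fresh (l := p.items) (k := fun kv => kv.1)
    (v := fun kv => cm.getD kv.2 0) (d := PySem.Dict.empty)
    (fun a _ => PySem.Dict.contains_empty a.1) hknd
  have hB := PySem.Dict.items_foldl_insert_fresh (l := p.items) (k := fun kv => kv.1)
    (v := fun kv => (((PySem.List.index? u kv.2).getD 0 : Nat) : Int)) (d := PySem.Dict.empty)
    (fun a _ => PySem.Dict.contains_empty a.1) hknd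
  rw [hA, hB]
  refine congrArg _ (List.map_congr_left (fun kv hkv => ?_))
  have hval : kv.2 ∈ p.values := by
    have h : p.values = p.items.map (fun kv => kv.2) := rfl
    rw [h]; exact List.mem_map.mpr ⟨kv, hkv, rfl⟩
  have hvu : kv.2 ∈ u := by
    rw [hu, PySem.List.mem_sorted]; exact (PySem.Set.mem_ofList _ _).mpr hval
  have hund : u.Nodup :=
    (PySem.List.sorted_perm _ _ _).nodup_iff.mpr (PySem.Set.nodup_ofList _)
  have h1 : cm.getD kv.2 0 = (u.idxOf kv.2 : Int) := by
    rw [hcm]; exact pvGetD_enumFold u hund _ hvu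
  show (kv.1, cm.getD kv.2 0) = (kv.1, (((PySem.List.index? u kv.2).getD 0 : Nat) : Int))
  rw [h1]
  exact congrArg _ (congrArg (fun n : Nat => (n : Int)) (pvIndex?_getD_of_mem u kv.2 hvu).symm)

-- signatures over P ++ [p] split into the signature over P and the class in p
theorem pvSig_append_singleton (P : List (List (Int × Int))) (p : List (Int × Int)) (e : Int) :
    pvSig (P ++ [p]) e = pvSig P e ++ [(PySem.Dict.ofList p).getD e 0] := by
  simp [pvSig]

-- B's outer fold: characterization of the accumulated labeling
theorem pvAccChar (p0 : List (Int × Int)) :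
    ∀ ps : List (List (Int × Int)), ps ≠ [] →
      (ps.foldl
        (fun (acc : PySem.Dict Int Int) p =>
          let pd := PySem.Dict.ofList p
          ((PySem.List.sorted (PySem.Dict.ofList p0).keys (fun x => x) false).foldl
            (fun (st : PySem.Dict (Int × Int) Int × PySem.Dict Int Int) e =>
              let key := (acc.getD e 0, pd.getD e 0)
              let ids := if st.1.contains key then st.1
                         else st.1.insert key (st.1.items.length : Int)
              (ids, st.2.insert e (ids.getD key 0)))
            (PySem.Dict.empty, PySem.Dict.empty)).2)
        (PySem.Dict.ofList p0)).items
      = (PySem.List.sorted (PySem.Dict.ofList p0).keys (fun x => x) false).map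
          (fun e => (e,
            ((PySem.List.dedup
                ((PySem.List.sorted (PySem.Dict.ofList p0).keys (fun x => x) false).map
                  (pvSig (p0 :: ps)))).idxOf (pvSig (p0 :: ps) e) : Int))) := by
  intro ps
  induction ps using List.reverseRecOn with
  | nil => intro h; exact absurd rfl h
  | append_singleton ps p ih =>
    intro _
    set elements := PySem.List.sorted (PySem.Dict.ofList p0).keys (fun x => x) false with helems
    have hnd : elements.Nodup := pvElems_nodup p0
    rw [List.foldl_append, List.foldl_cons, List.foldl_nil]
    set acc := ps.foldl
        (fun (acc : PySem.Dict Int Int) p =>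
          let pd := PySem.Dict.ofList p
          (elements.foldl
            (fun (st : PySem.Dict (Int × Int) Int × PySem.Dict Int Int) e =>
              let key := (acc.getD e 0, pd.getD e 0)
              let ids := if st.1.contains key then st.1
                         else st.1.insert key (st.1.items.length : Int)
              (ids, st.2.insert e (ids.getD key 0)))
            (PySem.Dict.empty, PySem.Dict.empty)).2)
        (PySem.Dict.ofList p0) with hacc
    set kf : Int → Int × Int := fun e => (acc.getD e 0, (PySem.Dict.ofList p).getD e 0) with hkf
    have hbridge :
        (elements.foldl
          (fun (st : PySem.Dict (Int × Int) Int × PySem.Dict Int Int) e =>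
            let key := (acc.getD e 0, (PySem.Dict.ofList p).getD e 0)
            let ids := if st.1.contains key then st.1
                       else st.1.insert key (st.1.items.length : Int)
            (ids, st.2.insert e (ids.getD key 0)))
          (PySem.Dict.empty, PySem.Dict.empty))
        = elements.foldl (pvStepB kf)
            (pvIdDict (PySem.List.dedup (([] : List Int).map kf)), PySem.Dict.empty) := rfl
    show (elements.foldl _ (PySem.Dict.empty, PySem.Dict.empty)).2.items = _
    rw [hbridge, pvLoopB kf elements [] PySem.Dict.empty hnd
      (fun e _ => PySem.Dict.contains_empty e)]
    have hei : PySem.Dict.empty.items = ([] : List (Int × Int)) := rfl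
    simp only [List.nil_append, hei]
    -- the (acc id, next class) key respects exactly the equality classes of the full signature
    have haccD : ∀ a ∈ elements, ∀ b ∈ elements,
        (acc.getD a 0 = acc.getD b 0 ↔ pvSig (p0 :: ps) a = pvSig (p0 :: ps) b) := by
      intro a ha b hb
      by_cases hps : ps = []
      · subst hps
        have hae : acc = PySem.Dict.ofList p0 := rfl
        rw [hae]
        constructor
        · intro h; simp [pvSig, h]
        · intro h
          have := congrArg (fun l => l.headI) h
          simpa [pvSig] using this
      · have hitems := ih hps
        have hga := pvGetD_of_items acc elements _ hitems hnd a ha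
        have hgb := pvGetD_of_items acc elements _ hitems hnd b hb
        rw [hga, hgb]
        constructor
        · intro h
          have h' := Int.ofNat.inj h
          have hmema : pvSig (p0 :: ps) a ∈
              PySem.List.dedup (elements.map (pvSig (p0 :: ps))) :=
            (PySem.List.mem_dedup _ _).mpr (List.mem_map.mpr ⟨a, ha, rfl⟩)
          exact pvIdxOf_inj _ _ _ hmema h'
        · intro h; rw [h]
    have hequiv : ∀ a ∈ elements, ∀ b ∈ elements,
        (kf a = kf b ↔ pvSig (p0 :: (ps ++ [p])) a = pvSig (p0 :: (ps ++ [p])) b) := by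
      intro a ha b hb
      have hsa : pvSig (p0 :: (ps ++ [p])) a
          = pvSig (p0 :: ps) a ++ [(PySem.Dict.ofList p).getD a 0] := by
        have : p0 :: (ps ++ [p]) = (p0 :: ps) ++ [p] := by simp
        rw [this, pvSig_append_singleton]
      have hsb : pvSig (p0 :: (ps ++ [p])) b
          = pvSig (p0 :: ps) b ++ [(PySem.Dict.ofList p).getD b 0] := by
        have : p0 :: (ps ++ [p]) = (p0 :: ps) ++ [p] := by simp
        rw [this, pvSig_append_singleton]
      rw [hsa, hsb, hkf]
      constructor
      · intro h
        have h1 := congrArg Prod.fst h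
        have h2 := congrArg Prod.snd h
        simp only at h1 h2
        rw [(haccD a ha b hb).mp h1, h2]
      · intro h
        obtain ⟨h1, h2⟩ := List.append_inj h (by
          have := congrArg List.length h
          simpa using this)
        have h2' : (PySem.Dict.ofList p).getD a 0 = (PySem.Dict.ofList p).getD b 0 := by
          simpa using h2
        exact Prod.ext ((haccD a ha b hb).mpr h1) h2'
    obtain ⟨_, hidx⟩ := pvIdxTransfer kf (pvSig (p0 :: (ps ++ [p]))) elements hequiv
    exact List.map_congr_left (fun e he => by rw [hidx e he])

theorem pvB_general (p0 : List (Int × Int)) (rest : List (List (Int × Int))) (hr : rest ≠ []) :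
    meet_partitions_alt (p0 :: rest) =
      (PySem.List.sorted (PySem.Dict.ofList p0).keys (fun x => x) false).map
        (fun e => (e,
          ((PySem.List.dedup
              ((PySem.List.sorted (PySem.Dict.ofList p0).keys (fun x => x) false).map
                (pvSig (p0 :: rest)))).idxOf (pvSig (p0 :: rest) e) : Int))) := by
  simp only [meet_partitions_alt, if_neg hr]
  exact pvAccChar p0 rest hr

-- ===== VERDICT (by name: the statement is the Claim_ definition above) =====
theorem meet_partitions_spec : Claim_equal_meet_partitions := by
  intro partitions _ _
  unfold Spec_meet_partitions
  match partitions with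
  | [] => rfl
  | [p0] => exact pvSingle p0
  | p0 :: q :: rest =>
    rw [pvA_general p0 (q :: rest) (by simp), pvB_general p0 (q :: rest) (by simp)]
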